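-- pv_equiv track=rewrite | github.com/Jenny880606/Paper_Classification | TFIDF+Randomforest.py | KEYWORDS_vector_for_CATE
-- ===== SOURCE A (Python) =====
-- def KEYWORDS_vector_for_CATE(key, words):
--     T = []
--     for w in words:
--         temp=[]
--         for k in key:
--             have=0
--             for ww in w:
--                 if ww==k:
--                     temp.append(1)
--                     have=1
--                     break
--             if have==0:
--                 temp.append(0)
--         T.append(temp)
--
--     return T
-- ===== SOURCE B (Python) =====
-- def KEYWORDS_vector_for_CATE(key, words):
--     idx = {}
--     for i, k in enumerate(key):
--         idx[k] = idx.get(k, []) + [i]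
--     T = []
--     for w in words:
--         row = [0] * len(key)
--         for ww in w:
--             for i in idx.get(ww, []):
--                 row[i] = 1
--         T.append(row)
--     return T
-- ===== Notes on version B (the rewrite author's own statement) =====
-- stated objective: faster
-- what changed: Replaces the keyword-outer loop with a linear scan over each document's tokens: a dict built once maps each keyword to all its column indices (duplicates kept), and each row starts as a zero vector whose indexed positions are set to 1, removing the per-keyword scan of the document.
import Mathlib
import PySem

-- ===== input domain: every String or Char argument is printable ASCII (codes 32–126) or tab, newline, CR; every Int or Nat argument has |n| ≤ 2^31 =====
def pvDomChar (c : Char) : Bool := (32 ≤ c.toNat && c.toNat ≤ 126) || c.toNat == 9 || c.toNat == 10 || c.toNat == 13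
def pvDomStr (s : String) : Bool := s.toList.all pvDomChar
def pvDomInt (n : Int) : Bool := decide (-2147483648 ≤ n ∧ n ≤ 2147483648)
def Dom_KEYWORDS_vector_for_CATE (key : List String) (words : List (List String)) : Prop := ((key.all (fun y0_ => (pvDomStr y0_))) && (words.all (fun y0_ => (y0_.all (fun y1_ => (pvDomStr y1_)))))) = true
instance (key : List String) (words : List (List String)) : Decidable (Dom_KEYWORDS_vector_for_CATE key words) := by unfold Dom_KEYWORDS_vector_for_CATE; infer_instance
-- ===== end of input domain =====

-- B replaces A's per-keyword scan of each document by a keyword→column-indices dict and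
-- in-place marking of a zero row per document (objective: faster, measured).

-- ===== PORT A =====
-- inner 'for ww in w: if ww==k: …; break' loop of A (returns whether the break fired)
def pvFindTok : List String → String → Bool
  | [], _ => false
  | ww :: rest, k => if ww == k then true else pvFindTok rest k

-- 'temp=[]; for k in key: … append 1/0'
def pvRowA (key : List String) (w : List String) : List Int :=
  key.foldl (fun temp k => temp ++ (if pvFindTok w k then [1] else [0])) []

def KEYWORDS_vector_for_CATE (key : List String) (words : List (List String)) : List (List Int) :=
  words.foldl (fun T w => T ++ [pvRowA key w]) []

-- ===== PORT B =====
-- 'idx = {}; for i, k in enumerate(key): idx[k] = idx.get(k, []) + [i]'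
def pvBuildIdx (key : List String) : PySem.Dict String (List Int) :=
  (PySem.List.enumerate key).foldl (fun d p => d.modify p.2 [] (· ++ [p.1])) PySem.Dict.empty

-- 'row = [0]*len(key); for ww in w: for i in idx.get(ww, []): row[i] = 1'
def pvMarkRow (idx : PySem.Dict String (List Int)) (row : List Int) (w : List String) : List Int :=
  w.foldl (fun row ww => (idx.getD ww []).foldl (fun row i => PySem.List.pySetD row i 1) row) row

def KEYWORDS_vector_for_CATE_alt (key : List String) (words : List (List String)) : List (List Int) :=
  let idx := pvBuildIdx key
  words.foldl (fun T w => T ++ [pvMarkRow idx (List.replicate key.length 0) w]) []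

-- ===== PRECONDITION & SPEC =====
def Spec_KEYWORDS_vector_for_CATE (key : List String) (words : List (List String)) (out : List (List Int)) : Prop := out = KEYWORDS_vector_for_CATE_alt key words
instance (key : List String) (words : List (List String)) (out : List (List Int)) : Decidable (Spec_KEYWORDS_vector_for_CATE key words out) := by unfold Spec_KEYWORDS_vector_for_CATE; infer_instance

-- ===== CLAIM (what is proved, stated in full; the proofs are below) =====
def Claim_equal_KEYWORDS_vector_for_CATE : Prop := ∀ (key : List String) (words : List (List String)), Dom_KEYWORDS_vector_for_CATE key words → Spec_KEYWORDS_vector_for_CATE key words (KEYWORDS_vector_for_CATE key words)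

-- ===== LEMMAS AND PROOFS =====

-- A's inner loop finds k iff k is a member of the document
theorem pvFindTok_eq_mem (w : List String) (k : String) : pvFindTok w k = decide (k ∈ w) := by
  induction w with
  | nil => simp [pvFindTok]
  | cons ww rest ih =>
    simp only [pvFindTok]
    by_cases h : ww = k
    · simp [h]
    · simp [h, ih, Ne.symm h]

-- A's row is a map over the keywords
theorem pvRowA_eq_map (key w : List String) :
    pvRowA key w = key.map (fun k => if pvFindTok w k then (1 : Int) else 0) := by
  have : ∀ k, (if pvFindTok w k then ([1] : List Int) else [0])
      = [if pvFindTok w k then (1 : Int) else 0] := by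
    intro k; by_cases h : pvFindTok w k <;> simp [h]
  simp only [pvRowA, this, PySem.List.foldl_append_singleton_eq_map, List.nil_append]

-- membership in the index dict: i is listed under s iff i is a column of keyword s
theorem pvMem_buildIdx (key : List String) (s : String) (i : Int) :
    i ∈ (pvBuildIdx key).getD s [] ↔ ∃ (k : Nat), ∃ _ : k < key.length, key[k] = s ∧ i = (k : Int) := by
  have hfold : pvBuildIdx key
      = ((PySem.List.enumerate key).map (fun p => (p.2, p.1))).foldl
          (fun d p => d.modify p.1 [] (· ++ [p.2])) PySem.Dict.empty := by
    simp [pvBuildIdx, List.foldl_map]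
  rw [hfold]
  have := PySem.Dict.getD_foldl_modify_append
    (l := (PySem.List.enumerate key).map (fun p => (p.2, p.1)))
    (d := (PySem.Dict.empty : PySem.Dict String (List Int))) (c := s)
  rw [this]
  simp only [PySem.Dict.getD_empty, List.nil_append, List.mem_map, List.mem_filter]
  constructor
  · rintro ⟨p, ⟨⟨q, hq, hpq⟩, hs⟩, hi⟩
    obtain ⟨k, hk, rfl⟩ := (PySem.List.mem_enumerate_iff _ _ _).mp hq
    subst hpq
    simp only at hs hi
    exact ⟨k, hk, by simpa using hs, by omega⟩
  · rintro ⟨k, hk, hks, rfl⟩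
    refine ⟨(key[k], (k : Int)), ⟨⟨((k : Int), key[k]), ?_, rfl⟩, by simpa using hks⟩, rfl⟩
    exact (PySem.List.mem_enumerate_iff _ _ _).mpr ⟨k, hk, by simp⟩

-- the inner marking fold preserves length
theorem pvLen_markInner (is : List Int) : ∀ row : List Int,
    (is.foldl (fun row i => PySem.List.pySetD row i 1) row).length = row.length := by
  induction is with
  | nil => intro row; rfl
  | cons i is ih => intro row; simp [ih, PySem.List.length_pySetD]

-- the inner marking fold: entry j becomes 1 iff j is listed, else is unchanged
theorem pvGet_markInner (is : List Int)
    (hin : ∀ i ∈ is, ∃ k : Nat, i = (k : Int)) :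
    ∀ (row : List Int) (j : Nat),
    (is.foldl (fun row i => PySem.List.pySetD row i 1) row)[j]?
      = if (j : Int) ∈ is then (if j < row.length then some 1 else none) else row[j]? := by
  induction is with
  | nil => intro row j; simp
  | cons i is ih =>
    intro row j
    obtain ⟨k, rfl⟩ := hin i (by simp)
    have hin' : ∀ i ∈ is, ∃ k : Nat, i = (k : Int) := fun i h => hin i (by simp [h])
    simp only [List.foldl_cons, PySem.List.pySetD_natCast]
    rw [ih hin']
    by_cases hj : (j : Int) ∈ is
    · simp [hj, List.length_set]
    · by_cases hk : k = j
      · subst hk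
        simp [hj, List.getElem?_set]
      · have : ((j : Int) = (k : Int)) ↔ False := by simp; omega
        simp [hj, this, List.getElem?_set_ne (by omega)]

-- the whole row-marking loop, entrywise
theorem pvGet_markRow (idx : PySem.Dict String (List Int))
    (hidx : ∀ s i, i ∈ idx.getD s [] → ∃ k : Nat, i = (k : Int)) (w : List String) :
    ∀ (row : List Int) (j : Nat),
    (pvMarkRow idx row w)[j]?
      = if (∃ ww ∈ w, (j : Int) ∈ idx.getD ww []) then (if j < row.length then some 1 else none)
        else row[j]? := by
  induction w with
  | nil => intro row j; simp [pvMarkRow]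
  | cons ww w ih =>
    intro row j
    have hlen := pvLen_markInner (idx.getD ww []) row
    have hstep := pvGet_markInner (idx.getD ww []) (hidx ww)
    simp only [pvMarkRow, List.foldl_cons] at *
    rw [ih, hlen, hstep]
    by_cases h1 : (j : Int) ∈ idx.getD ww []
    · simp [h1]
    · by_cases h2 : ∃ ww' ∈ w, (j : Int) ∈ idx.getD ww' [] <;> simp [h1, h2]

-- per document, A's row equals B's row
theorem pvRow_eq (key w : List String) :
    pvRowA key w = pvMarkRow (pvBuildIdx key) (List.replicate key.length 0) w := by
  have hidx : ∀ s i, i ∈ (pvBuildIdx key).getD s [] → ∃ k : Nat, i = (k : Int) := by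
    intro s i hi
    obtain ⟨k, _, _, rfl⟩ := (pvMem_buildIdx key s i).mp hi
    exact ⟨k, rfl⟩
  apply List.ext_getElem?
  intro j
  rw [pvRowA_eq_map, pvGet_markRow _ hidx, List.getElem?_map]
  by_cases hj : j < key.length
  · have hcond : (∃ ww ∈ w, (j : Int) ∈ (pvBuildIdx key).getD ww []) ↔ key[j] ∈ w := by
      constructor
      · rintro ⟨ww, hww, hmem⟩
        obtain ⟨k, hk, hks, hjk⟩ := (pvMem_buildIdx key ww (j : Int)).mp hmem
        have : k = j := by omega
        subst this; rwa [hks]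
      · intro h
        exact ⟨key[j], h, (pvMem_buildIdx key key[j] (j : Int)).mpr ⟨j, hj, rfl, rfl⟩⟩
    by_cases hc : key[j] ∈ w
    · simp [hcond, hc, hj, pvFindTok_eq_mem, List.length_replicate]
    · simp [hcond, hc, hj, pvFindTok_eq_mem, List.length_replicate]
  · have hcond : ¬ (∃ ww ∈ w, (j : Int) ∈ (pvBuildIdx key).getD ww []) := by
      rintro ⟨ww, _, hmem⟩
      obtain ⟨k, hk, _, hjk⟩ := (pvMem_buildIdx key ww (j : Int)).mp hmem
      omega
    simp [hcond, hj, List.length_replicate]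

-- ===== VERDICT (by name: the statement is the Claim_ definition above) =====
theorem KEYWORDS_vector_for_CATE_spec : Claim_equal_KEYWORDS_vector_for_CATE := by
  intro key words _
  show _ = _
  simp only [KEYWORDS_vector_for_CATE, KEYWORDS_vector_for_CATE_alt,
    PySem.List.foldl_append_singleton_eq_map, List.nil_append]
  exact List.map_congr_left fun w _ => pvRow_eq key w
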